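-- pv_equiv track=rewrite | github.com/Julien-pour/arc_example | others_examples/14b-solved_32b-failed_gen4/6cdd2623/task.py | transform
-- ===== SOURCE A (Python) =====
-- def transform(grid):
--     rows = len(grid)
--     cols = len(grid[0])
--     transformed_grid = [[0] * cols for _ in range(rows)]
--     target_numbers = {3, 8, 2, 6, 7}
--     for i in range(rows):
--         if grid[i][0] in target_numbers and grid[i][cols - 1] in target_numbers:
--             transformed_grid[i] = [grid[i][0]] * cols
--     for j in range(cols):
--         if grid[0][j] in target_numbers and grid[rows - 1][j] in target_numbers:
--             for i in range(rows):
--                 transformed_grid[i][j] = grid[0][j]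
--     return transformed_grid
-- ===== SOURCE B (Python) =====
-- def transform(grid):
--     targets = {3, 8, 2, 6, 7}
--     rows, cols = len(grid), len(grid[0])
--     base = [r[0] if r[0] in targets and r[cols - 1] in targets else 0 for r in grid]
--     out_cols = []
--     for j in range(cols):
--         if grid[0][j] in targets and grid[rows - 1][j] in targets:
--             out_cols.append([grid[0][j]] * rows)
--         else:
--             out_cols.append(base)
--     return [list(t) for t in zip(*out_cols)]
-- ===== Notes on version B (the rewrite author's own statement) =====
-- stated objective: alternative
-- what changed: B builds the output column-by-column (a qualifying column is a constant column, otherwise a shared row-fallback column) and then transposes with zip(*cols), instead of A's allocate-then-two-overwriting-mutation-passes over rows and columns.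
import Mathlib
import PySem

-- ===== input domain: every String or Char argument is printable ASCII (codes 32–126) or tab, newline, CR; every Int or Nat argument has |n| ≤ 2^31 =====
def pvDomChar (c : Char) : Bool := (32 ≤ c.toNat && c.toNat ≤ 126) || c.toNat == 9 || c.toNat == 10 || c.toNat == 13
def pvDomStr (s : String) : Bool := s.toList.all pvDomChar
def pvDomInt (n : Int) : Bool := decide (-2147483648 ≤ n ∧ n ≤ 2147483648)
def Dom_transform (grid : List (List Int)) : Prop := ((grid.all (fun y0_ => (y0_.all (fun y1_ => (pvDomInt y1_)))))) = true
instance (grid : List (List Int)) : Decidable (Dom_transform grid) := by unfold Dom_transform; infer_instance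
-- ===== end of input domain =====

-- B builds the output column-by-column (constant column when it qualifies, else a shared row-fallback
-- column) and transposes with zip; A allocates a zero grid and overwrites in two mutating passes.

-- membership in A's literal set {3, 8, 2, 6, 7}
def pvTgt (x : Int) : Bool := x == 3 || x == 8 || x == 2 || x == 6 || x == 7

-- ===== PORT A =====
def transform (grid : List (List Int)) : List (List Int) :=
  let rows := grid.length
  let cols := (PySem.List.pyGetD grid 0 []).length
  let tg0 : List (List Int) := List.replicate rows (List.replicate cols 0)
  let tg1 := (List.range rows).foldl (fun tg (i : Nat) =>
      if pvTgt (PySem.List.pyGetD (PySem.List.pyGetD grid (i : Int) []) 0 0)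
          && pvTgt (PySem.List.pyGetD (PySem.List.pyGetD grid (i : Int) []) ((cols : Int) - 1) 0)
      then tg.set i (List.replicate cols (PySem.List.pyGetD (PySem.List.pyGetD grid (i : Int) []) 0 0))
      else tg) tg0
  (List.range cols).foldl (fun tg (j : Nat) =>
      if pvTgt (PySem.List.pyGetD (PySem.List.pyGetD grid 0 []) (j : Int) 0)
          && pvTgt (PySem.List.pyGetD (PySem.List.pyGetD grid ((rows : Int) - 1) []) (j : Int) 0)
      then (List.range rows).foldl (fun tg (i : Nat) =>
              tg.set i ((tg.getD i []).set j (PySem.List.pyGetD (PySem.List.pyGetD grid 0 []) (j : Int) 0))) tg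
      else tg) tg1

-- ===== PORT B =====
-- pvZip transliterates Python's zip(*out_cols): emit the tuple of heads while no list is exhausted.
def pvZip : List Int → List (List Int) → List (List Int)
  | [], _ => []
  | x :: c', cs =>
      if cs.any (fun d => d.isEmpty) then []
      else (x :: cs.map (fun d => d.headD 0)) :: pvZip c' (cs.map (fun d => d.tail))

def transform_alt (grid : List (List Int)) : List (List Int) :=
  let rows := grid.length
  let cols := (PySem.List.pyGetD grid 0 []).length
  let base : List Int := grid.map (fun r =>
      if pvTgt (PySem.List.pyGetD r 0 0) && pvTgt (PySem.List.pyGetD r ((cols : Int) - 1) 0)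
      then PySem.List.pyGetD r 0 0 else 0)
  let outCols : List (List Int) := (List.range cols).map (fun (j : Nat) =>
      if pvTgt (PySem.List.pyGetD (PySem.List.pyGetD grid 0 []) (j : Int) 0)
          && pvTgt (PySem.List.pyGetD (PySem.List.pyGetD grid ((rows : Int) - 1) []) (j : Int) 0)
      then List.replicate rows (PySem.List.pyGetD (PySem.List.pyGetD grid 0 []) (j : Int) 0)
      else base)
  match outCols with
  | [] => []
  | c :: cs => pvZip c cs

-- ===== PRECONDITION & SPEC =====
-- Pre_ admits exactly the inputs on which Python A returns (no IndexError): a nonempty grid of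
-- nonempty rows, where A's short-circuited endpoint tests only reach indices inside each row.
def Pre_transform (grid : List (List Int)) : Prop :=
  grid ≠ [] ∧
  (∀ row ∈ grid, row ≠ [] ∧
      (pvTgt (row.headD 0) = true → (grid.headD []).length ≤ row.length)) ∧
  (∀ j < (grid.headD []).length,
      pvTgt ((grid.headD []).getD j 0) = true → j < ((grid.getLast?).getD []).length)
instance (grid : List (List Int)) : Decidable (Pre_transform grid) := by
  unfold Pre_transform; infer_instance
def pvWitness_transform : List (List Int) := [[3, 1, 8], [2, 0, 6], [7, 5, 3]]
def Spec_transform (grid : List (List Int)) (out : List (List Int)) : Prop := out = transform_alt grid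
instance (grid : List (List Int)) (out : List (List Int)) : Decidable (Spec_transform grid out) := by unfold Spec_transform; infer_instance

-- ===== CLAIM (what is proved, stated in full; the proofs are below) =====
def Claim_equal_transform : Prop := ∀ (grid : List (List Int)), Dom_transform grid → Pre_transform grid → Spec_transform grid (transform grid)

-- ===== LEMMAS AND PROOFS =====

-- canonical per-cell form both ports are reduced to
def pvCanon (grid : List (List Int)) : List (List Int) :=
  grid.map (fun row =>
    (List.range (PySem.List.pyGetD grid 0 []).length).map (fun (j : Nat) =>
      if pvTgt (PySem.List.pyGetD (PySem.List.pyGetD grid 0 []) (j : Int) 0)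
          && pvTgt (PySem.List.pyGetD (PySem.List.pyGetD grid ((grid.length : Int) - 1) []) (j : Int) 0)
      then PySem.List.pyGetD (PySem.List.pyGetD grid 0 []) (j : Int) 0
      else if pvTgt (PySem.List.pyGetD row 0 0)
          && pvTgt (PySem.List.pyGetD row (((PySem.List.pyGetD grid 0 []).length : Int) - 1) 0)
        then PySem.List.pyGetD row 0 0 else 0))

theorem pv_foldl_set_if {α : Type} (d : α) (C : Nat → Bool) (v : Nat → α) :
    ∀ (k : Nat) (l : List α), k ≤ l.length →
      (List.range k).foldl (fun acc i => if C i then acc.set i (v i) else acc) l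
        = (List.range k).map (fun i => if C i then v i else l.getD i d) ++ l.drop k := by
  intro k
  induction k with
  | zero => intro l _; simp
  | succ k ih =>
    intro l hk
    rw [List.range_succ, List.foldl_append, List.map_append, ih l (by omega)]
    have hkl : k < l.length := by omega
    have hd : l.drop k = l[k] :: l.drop (k+1) := List.drop_eq_getElem_cons hkl
    simp only [List.foldl_cons, List.foldl_nil, List.map_cons, List.map_nil]
    by_cases hC : C k
    · simp only [hC, if_true]
      rw [hd, List.set_append_right _ _ (by simp), List.length_map, List.length_range,
        Nat.sub_self, List.set_cons_zero]
      simp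
    · simp [hC]
      rw [hd]
      simp [List.getElem?_eq_getElem hkl]

theorem pv_foldl_set_fn {α : Type} (d : α) (f : α → α) :
    ∀ (k : Nat) (l : List α), k ≤ l.length →
      (List.range k).foldl (fun acc i => acc.set i (f (acc.getD i d))) l
        = (List.range k).map (fun i => f (l.getD i d)) ++ l.drop k := by
  intro k
  induction k with
  | zero => intro l _; simp
  | succ k ih =>
    intro l hk
    rw [List.range_succ, List.foldl_append, List.map_append, ih l (by omega)]
    have hkl : k < l.length := by omega
    have hd : l.drop k = l[k] :: l.drop (k+1) := List.drop_eq_getElem_cons hkl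
    simp only [List.foldl_cons, List.foldl_nil, List.map_cons, List.map_nil]
    have hacc : (((List.range k).map (fun i => f (l.getD i d)) ++ l.drop k).getD k d) = l.getD k d := by
      rw [List.getD_append_right _ _ _ _ (by simp)]
      simp
    rw [hacc, hd, List.set_append_right _ _ (by simp), List.length_map, List.length_range,
      Nat.sub_self, List.set_cons_zero]
    simp

theorem pv_map_range_getD {α β : Type} (d : α) (F : α → β) (l : List α) :
    (List.range l.length).map (fun i => F (l.getD i d)) = l.map F := by
  apply List.ext_getElem (by simp)
  intro i h1 h2
  have hi : i < l.length := by simpa using h2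
  simp [List.getElem?_eq_getElem hi]

theorem pv_outer (Cc : Nat → Bool) (w : Nat → Int) (rows : Nat) :
    ∀ (js : List Nat) (l : List (List Int)), l.length = rows →
      js.foldl (fun tg j => if Cc j then
          (List.range rows).foldl (fun tg (i : Nat) => tg.set i ((tg.getD i []).set j (w j))) tg
        else tg) l
      = l.map (fun r => js.foldl (fun r j => if Cc j then r.set j (w j) else r) r) := by
  intro js
  induction js with
  | nil => intro l _; simp
  | cons j js ih =>
    intro l hl
    subst hl
    simp only [List.foldl_cons]
    by_cases hC : Cc j
    · simp only [hC, if_true]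
      rw [pv_foldl_set_fn [] (fun r => r.set j (w j)) l.length l (by omega),
        List.drop_length, List.append_nil, pv_map_range_getD [] (fun r => r.set j (w j)) l,
        ih (l.map _) (by simp), List.map_map]
      rfl
    · simp only [hC, if_false, Bool.false_eq_true]
      rw [ih l rfl]

-- A reduces to the canonical per-cell form (same route as two staged rewrites of the folds).
theorem pv_A_canon (grid : List (List Int)) :
    transform grid = pvCanon grid := by
  have h1 : transform grid =
      (List.range ((PySem.List.pyGetD grid 0 []).length)).foldl (fun tg (j : Nat) =>
        if pvTgt (PySem.List.pyGetD (PySem.List.pyGetD grid 0 []) (j : Int) 0)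
            && pvTgt (PySem.List.pyGetD (PySem.List.pyGetD grid ((grid.length : Int) - 1) []) (j : Int) 0)
        then (List.range grid.length).foldl (fun tg (i : Nat) =>
                tg.set i ((tg.getD i []).set j
                  (PySem.List.pyGetD (PySem.List.pyGetD grid 0 []) (j : Int) 0))) tg
        else tg)
        ((List.range grid.length).foldl (fun tg (i : Nat) =>
          if pvTgt (PySem.List.pyGetD (PySem.List.pyGetD grid (i : Int) []) 0 0)
              && pvTgt (PySem.List.pyGetD (PySem.List.pyGetD grid (i : Int) [])
                  (((PySem.List.pyGetD grid 0 []).length : Int) - 1) 0)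
          then tg.set i (List.replicate (PySem.List.pyGetD grid 0 []).length
                  (PySem.List.pyGetD (PySem.List.pyGetD grid (i : Int) []) 0 0))
          else tg)
          (List.replicate grid.length (List.replicate (PySem.List.pyGetD grid 0 []).length (0 : Int)))) := rfl
  rw [h1]
  rw [pv_foldl_set_if (List.replicate (PySem.List.pyGetD grid 0 []).length (0 : Int))
      (fun (i : Nat) => pvTgt (PySem.List.pyGetD (PySem.List.pyGetD grid (i : Int) []) 0 0)
          && pvTgt (PySem.List.pyGetD (PySem.List.pyGetD grid (i : Int) [])
              (((PySem.List.pyGetD grid 0 []).length : Int) - 1) 0))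
      (fun (i : Nat) => List.replicate (PySem.List.pyGetD grid 0 []).length
          (PySem.List.pyGetD (PySem.List.pyGetD grid (i : Int) []) 0 0))
      grid.length _ (by simp)]
  rw [show (List.replicate grid.length (List.replicate (PySem.List.pyGetD grid 0 []).length (0 : Int))).drop grid.length = [] by simp,
    List.append_nil]
  have h2 : (List.range grid.length).map (fun (i : Nat) =>
      if pvTgt (PySem.List.pyGetD (PySem.List.pyGetD grid (i : Int) []) 0 0)
          && pvTgt (PySem.List.pyGetD (PySem.List.pyGetD grid (i : Int) [])
              (((PySem.List.pyGetD grid 0 []).length : Int) - 1) 0)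
      then List.replicate (PySem.List.pyGetD grid 0 []).length
          (PySem.List.pyGetD (PySem.List.pyGetD grid (i : Int) []) 0 0)
      else (List.replicate grid.length (List.replicate (PySem.List.pyGetD grid 0 []).length (0 : Int))).getD i
          (List.replicate (PySem.List.pyGetD grid 0 []).length (0 : Int)))
      = (List.range grid.length).map (fun (i : Nat) =>
          List.replicate (PySem.List.pyGetD grid 0 []).length
            (if pvTgt (PySem.List.pyGetD (PySem.List.pyGetD grid (i : Int) []) 0 0)
                && pvTgt (PySem.List.pyGetD (PySem.List.pyGetD grid (i : Int) [])
                    (((PySem.List.pyGetD grid 0 []).length : Int) - 1) 0)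
            then PySem.List.pyGetD (PySem.List.pyGetD grid (i : Int) []) 0 0 else 0)) := by
    apply List.map_congr_left
    intro i hi
    have hiR : i < grid.length := List.mem_range.mp hi
    rw [List.getD_replicate _ hiR, ← apply_ite]
  rw [h2]
  rw [pv_outer
      (fun (j : Nat) => pvTgt (PySem.List.pyGetD (PySem.List.pyGetD grid 0 []) (j : Int) 0)
          && pvTgt (PySem.List.pyGetD (PySem.List.pyGetD grid ((grid.length : Int) - 1) []) (j : Int) 0))
      (fun (j : Nat) => PySem.List.pyGetD (PySem.List.pyGetD grid 0 []) (j : Int) 0)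
      grid.length _ _ (by simp), List.map_map]
  unfold pvCanon
  rw [← pv_map_range_getD ([] : List Int)
      (fun row => (List.range (PySem.List.pyGetD grid 0 []).length).map (fun (j : Nat) =>
        if pvTgt (PySem.List.pyGetD (PySem.List.pyGetD grid 0 []) (j : Int) 0)
            && pvTgt (PySem.List.pyGetD (PySem.List.pyGetD grid ((grid.length : Int) - 1) []) (j : Int) 0)
        then PySem.List.pyGetD (PySem.List.pyGetD grid 0 []) (j : Int) 0
        else if pvTgt (PySem.List.pyGetD row 0 0)
            && pvTgt (PySem.List.pyGetD row (((PySem.List.pyGetD grid 0 []).length : Int) - 1) 0)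
          then PySem.List.pyGetD row 0 0 else 0)) grid]
  apply List.map_congr_left
  intro i hi
  have hiR : i < grid.length := List.mem_range.mp hi
  simp only [Function.comp_apply]
  rw [pv_foldl_set_if (0 : Int)
      (fun (j : Nat) => pvTgt (PySem.List.pyGetD (PySem.List.pyGetD grid 0 []) (j : Int) 0)
          && pvTgt (PySem.List.pyGetD (PySem.List.pyGetD grid ((grid.length : Int) - 1) []) (j : Int) 0))
      (fun (j : Nat) => PySem.List.pyGetD (PySem.List.pyGetD grid 0 []) (j : Int) 0)
      (PySem.List.pyGetD grid 0 []).length _ (by simp)]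
  rw [show (List.replicate (PySem.List.pyGetD grid 0 []).length
      (if pvTgt (PySem.List.pyGetD (PySem.List.pyGetD grid (i : Int) []) 0 0)
          && pvTgt (PySem.List.pyGetD (PySem.List.pyGetD grid (i : Int) []) (((PySem.List.pyGetD grid 0 []).length : Int) - 1) 0)
      then PySem.List.pyGetD (PySem.List.pyGetD grid (i : Int) []) 0 0 else 0)).drop (PySem.List.pyGetD grid 0 []).length = []
    by simp, List.append_nil]
  apply List.map_congr_left
  intro j hj
  have hjK : j < (PySem.List.pyGetD grid 0 []).length := List.mem_range.mp hj
  rw [List.getD_replicate _ hjK]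
  simp only [PySem.List.pyGetD_natCast]

-- zip of equal-length columns is the row-indexed transpose
theorem pv_zip_eq : ∀ (c : List Int) (cs : List (List Int)),
    (∀ d ∈ cs, d.length = c.length) →
    pvZip c cs = (List.range c.length).map (fun i => (c :: cs).map (fun d => d.getD i 0)) := by
  intro c
  induction c with
  | nil => intro cs _; simp [pvZip]
  | cons x c' ih =>
    intro cs hlen
    have hno : cs.any (fun d => d.isEmpty) = false := by
      rw [List.any_eq_false]
      intro d hd
      have := hlen d hd
      simp only [List.isEmpty_iff]
      intro h; rw [h] at this; simp at this
    rw [pvZip, hno]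
    simp only [Bool.false_eq_true, if_false, List.length_cons]
    rw [ih (cs.map (fun d => d.tail)) (by
      intro d hd
      obtain ⟨e, he, rfl⟩ := List.mem_map.mp hd
      have := hlen e he
      simp [List.length_tail, this])]
    rw [List.range_succ_eq_map, List.map_cons, List.map_map]
    congr 1
    · simp only [List.map_cons, List.getD_cons_zero]
      congr 1
      apply List.map_congr_left
      intro d hd
      have hl := hlen d hd
      cases d with
      | nil => simp at hl
      | cons a as => simp
    · apply List.map_congr_left
      intro i hi
      simp only [Function.comp_apply, List.map_cons, List.getD_cons_succ, List.map_map]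
      congr 1
      apply List.map_congr_left
      intro d hd
      cases d with
      | nil => have := hlen [] hd; simp at this
      | cons a as => simp

-- B reduces to the canonical per-cell form (needs a nonempty first row so outCols ≠ []).
theorem pv_B_canon (grid : List (List Int))
    (hc : 0 < (PySem.List.pyGetD grid 0 []).length) :
    transform_alt grid = pvCanon grid := by
  set cols := (PySem.List.pyGetD grid 0 []).length with hcols
  set base : List Int := grid.map (fun r =>
      if pvTgt (PySem.List.pyGetD r 0 0) && pvTgt (PySem.List.pyGetD r ((cols : Int) - 1) 0)
      then PySem.List.pyGetD r 0 0 else 0) with hbase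
  set g : Nat → List Int := fun (j : Nat) =>
      if pvTgt (PySem.List.pyGetD (PySem.List.pyGetD grid 0 []) (j : Int) 0)
          && pvTgt (PySem.List.pyGetD (PySem.List.pyGetD grid ((grid.length : Int) - 1) []) (j : Int) 0)
      then List.replicate grid.length (PySem.List.pyGetD (PySem.List.pyGetD grid 0 []) (j : Int) 0)
      else base with hg
  have hglen : ∀ j, (g j).length = grid.length := by
    intro j
    rw [hg]
    dsimp only
    by_cases h : pvTgt (PySem.List.pyGetD (PySem.List.pyGetD grid 0 []) (j : Int) 0)
        && pvTgt (PySem.List.pyGetD (PySem.List.pyGetD grid ((grid.length : Int) - 1) []) (j : Int) 0)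
    · rw [if_pos h, List.length_replicate]
    · rw [if_neg h, hbase, List.length_map]
  have houtCols : (List.range cols).map g = g 0 :: ((List.range (cols - 1)).map (fun i => g (i + 1))) := by
    obtain ⟨k, hk⟩ : ∃ k, cols = k + 1 := ⟨cols - 1, by omega⟩
    rw [hk, List.range_succ_eq_map, List.map_cons, List.map_map]
    simp
  have hBdef : transform_alt grid =
      match (List.range cols).map g with
      | [] => []
      | c :: cs => pvZip c cs := rfl
  rw [hBdef, houtCols]
  dsimp only
  rw [pv_zip_eq (g 0) ((List.range (cols - 1)).map (fun i => g (i + 1))) (by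
    intro d hd
    obtain ⟨i, _, rfl⟩ := List.mem_map.mp hd
    rw [hglen, hglen])]
  rw [hglen 0, ← houtCols]
  unfold pvCanon
  rw [← pv_map_range_getD ([] : List Int)
      (fun row => (List.range cols).map (fun (j : Nat) =>
        if pvTgt (PySem.List.pyGetD (PySem.List.pyGetD grid 0 []) (j : Int) 0)
            && pvTgt (PySem.List.pyGetD (PySem.List.pyGetD grid ((grid.length : Int) - 1) []) (j : Int) 0)
        then PySem.List.pyGetD (PySem.List.pyGetD grid 0 []) (j : Int) 0
        else if pvTgt (PySem.List.pyGetD row 0 0)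
            && pvTgt (PySem.List.pyGetD row ((cols : Int) - 1) 0)
          then PySem.List.pyGetD row 0 0 else 0)) grid]
  apply List.map_congr_left
  intro i hi
  have hiR : i < grid.length := List.mem_range.mp hi
  rw [List.map_map]
  apply List.map_congr_left
  intro j hj
  simp only [Function.comp_apply, hg]
  by_cases h : pvTgt (PySem.List.pyGetD (PySem.List.pyGetD grid 0 []) (j : Int) 0)
      && pvTgt (PySem.List.pyGetD (PySem.List.pyGetD grid ((grid.length : Int) - 1) []) (j : Int) 0)
  · simp only [h, if_true]
    rw [List.getD_replicate _ hiR]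
  · simp only [h, Bool.false_eq_true, if_false, hbase]
    rw [List.getD_eq_getElem _ _ (by simpa using hiR), List.getElem_map,
      List.getD_eq_getElem _ _ hiR]

-- ===== VERDICT (by name: the statement is the Claim_ definition above) =====
theorem transform_spec : Claim_equal_transform := by
  intro grid _ hPre
  unfold Spec_transform
  have h0 : PySem.List.pyGetD grid 0 [] ∈ grid := by
    rw [PySem.List.pyGetD_zero]
    cases grid with
    | nil => exact absurd rfl hPre.1
    | cons r rs => simp
  have hc : 0 < (PySem.List.pyGetD grid 0 []).length := by
    have := (hPre.2.1 _ h0).1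
    exact List.length_pos_of_ne_nil this
  rw [pv_A_canon grid, pv_B_canon grid hc]
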